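-- pv_equiv track=rewrite | github.com/k-roy/RECTIFY | rectify/core/mpb_split_reads.py | _merge_cigar
-- ===== SOURCE A (Python) =====
-- def _merge_cigar(ops):
--     """Merge runs of the same CIGAR operation and drop zero-length ops."""
--     if not ops:
--         return ops
--     # Filter zero-length first so adjacent same-ops can merge
--     filtered = [(op, l) for op, l in ops if l > 0]
--     if not filtered:
--         return []
--     merged = [filtered[0]]
--     for op, length in filtered[1:]:
--         if op == merged[-1][0]:
--             merged[-1] = (op, merged[-1][1] + length)
--         else:
--             merged.append((op, length))
--     return merged
-- ===== SOURCE B (Python) =====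
-- def _merge_cigar(ops):
--     """Merge runs of the same CIGAR operation and drop zero-length ops."""
--     if not ops:
--         return ops
--     filtered = [(op, l) for op, l in ops if l > 0]
--     result = []
--     i = 0
--     n = len(filtered)
--     while i < n:
--         op = filtered[i][0]
--         j = i
--         total = 0
--         while j < n and filtered[j][0] == op:
--             total += filtered[j][1]
--             j += 1
--         result.append((op, total))
--         i = j
--     return result
-- ===== Notes on version B (the rewrite author's own statement) =====
-- stated objective: alternative
-- what changed: B consumes the filtered list run by run with an inner scan that sums each maximal block of equal ops (groupby-style), instead of A's accumulator that compares each element to merged[-1] and rewrites the last entry in place.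
import Mathlib
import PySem

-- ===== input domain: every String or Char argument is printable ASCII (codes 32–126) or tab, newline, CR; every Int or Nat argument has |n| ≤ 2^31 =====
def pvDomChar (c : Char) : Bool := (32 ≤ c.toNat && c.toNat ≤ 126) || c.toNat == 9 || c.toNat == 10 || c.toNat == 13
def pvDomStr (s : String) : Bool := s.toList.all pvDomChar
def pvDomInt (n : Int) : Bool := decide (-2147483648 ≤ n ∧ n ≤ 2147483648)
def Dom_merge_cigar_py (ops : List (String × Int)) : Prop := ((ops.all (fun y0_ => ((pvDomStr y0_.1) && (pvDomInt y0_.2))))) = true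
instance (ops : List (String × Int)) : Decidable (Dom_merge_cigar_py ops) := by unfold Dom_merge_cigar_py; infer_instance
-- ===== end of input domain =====

-- B re-implements A by consuming maximal runs of equal ops with an inner scan (groupby-style) instead of A's compare-to-merged[-1] accumulator; same values, alternative structure.
-- ===== PORT A =====
-- merged[-1] access: Python would raise on empty merged, which never happens; the none branch is a totality guard only.
def mergeStepA (merged : List (String × Int)) (p : String × Int) : List (String × Int) :=
  match merged.getLast? with
  | some last =>
      if p.1 == last.1 then merged.dropLast ++ [(p.1, last.2 + p.2)]
      else merged ++ [(p.1, p.2)]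
  | none => merged ++ [(p.1, p.2)]

def merge_cigar_py (ops : List (String × Int)) : List (String × Int) :=
  if ops = [] then ops
  else
    let filtered := ops.filter (fun p => p.2 > 0)
    if filtered = [] then []
    else
      match filtered with
      | [] => []
      | h :: t => t.foldl mergeStepA [h]

-- ===== PORT B =====
-- inner while loop = takeWhile-sum over the current run; outer while = recursion on the dropWhile remainder
def runsMerge (l : List (String × Int)) : List (String × Int) :=
  match l with
  | [] => []
  | p :: rest =>
      (p.1, p.2 + ((rest.takeWhile (fun q => q.1 == p.1)).map Prod.snd).sum)
        :: runsMerge (rest.dropWhile (fun q => q.1 == p.1))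
termination_by l.length
decreasing_by
  simp only [List.length_cons]
  exact Nat.lt_succ_of_le (List.length_dropWhile_le _ _)

def merge_cigar_py_alt (ops : List (String × Int)) : List (String × Int) :=
  if ops = [] then ops
  else runsMerge (ops.filter (fun p => p.2 > 0))

-- ===== PRECONDITION & SPEC =====
def Spec_merge_cigar_py (ops : List (String × Int)) (out : List (String × Int)) : Prop := out = merge_cigar_py_alt ops
instance (ops : List (String × Int)) (out : List (String × Int)) : Decidable (Spec_merge_cigar_py ops out) := by unfold Spec_merge_cigar_py; infer_instance

-- ===== CLAIM (what is proved, stated in full; the proofs are below) =====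
def Claim_equal_merge_cigar_py : Prop := ∀ (ops : List (String × Int)), Dom_merge_cigar_py ops → Spec_merge_cigar_py ops (merge_cigar_py ops)

-- ===== LEMMAS AND PROOFS =====

lemma foldl_mergeStepA (l pre : List (String × Int)) (c : String × Int) :
    l.foldl mergeStepA (pre ++ [c]) = pre ++ runsMerge (c :: l) := by
  induction l generalizing pre c with
  | nil =>
      simp [runsMerge, List.foldl]
  | cons q l ih =>
      by_cases h : q.1 == c.1
      · have : mergeStepA (pre ++ [c]) q = pre ++ [(q.1, c.2 + q.2)] := by
          simp [mergeStepA, List.getLast?_concat, h]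
        rw [List.foldl_cons, this, ih]
        have hq : q.1 = c.1 := eq_of_beq h
        simp [runsMerge, List.takeWhile, List.dropWhile, h, hq, add_assoc]
      · have : mergeStepA (pre ++ [c]) q = (pre ++ [c]) ++ [(q.1, q.2)] := by
          simp [mergeStepA, List.getLast?_concat, h, List.append_assoc]
        rw [List.foldl_cons, this, ih]
        simp [runsMerge, List.takeWhile, List.dropWhile, h]

-- ===== VERDICT (by name: the statement is the Claim_ definition above) =====
theorem merge_cigar_py_spec : Claim_equal_merge_cigar_py := by
  intro ops _
  unfold Spec_merge_cigar_py merge_cigar_py merge_cigar_py_alt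
  split
  · rfl
  · rename_i hne
    cases hf : ops.filter (fun p => p.2 > 0) with
    | nil => simp [runsMerge]
    | cons h t =>
        simpa [hf] using foldl_mergeStepA t [] h
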